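-- pv_equiv track=rewrite | github.com/GolzitskyNikolay/SPEAC-analysis | speac/speac_chapter_7/speac.py | translate_to_intervals
-- ===== SOURCE A (Python) =====
-- def translate_to_intervals(groups_of_midi_notes):
--     result = []
--     for list in groups_of_midi_notes:
--         list_res = []
--         list.sort()
--         remove_octaves_res.clear()
--         arranged_midi_notes = remove_octaves(list)
--         bass_note = arranged_midi_notes[0]
--         for note in arranged_midi_notes:
--             if note != bass_note:
--                 list_res.append(note - bass_note)
--
--         result.append(list_res)
--     return result
--
-- remove_octaves_res = []
--
-- def remove_octaves(notes):
--     if len(notes) == 0: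
--         return notes
--     remove_octaves_res.append(notes[0])
--     remove_octaves(remove_note(notes[0], notes[0:]))
--     return remove_octaves_res
--
-- def remove_note(note, notes):
--     result = list(filter(lambda x: x % 12 != note % 12, notes))
--     return result
-- ===== SOURCE B (Python) =====
-- def translate_to_intervals(groups_of_midi_notes):
--     result = []
--     for grp in groups_of_midi_notes:
--         grp.sort()
--         pc_to_min = {}
--         for n in grp:
--             pc = n % 12
--             if pc not in pc_to_min:
--                 pc_to_min[pc] = n
--         values = sorted(pc_to_min.values())
--         bass = values[0]
--         result.append([v - bass for v in values[1:]])
--     return result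
-- ===== Notes on version B (the rewrite author's own statement) =====
-- stated objective: idiomatic
-- what changed: Replaces A's recursive repeated-filtering dedup through a module-level global list with a single pass per group building a pitch-class-to-minimum-note dict, then one sort and a list-comprehension of differences from the bass.
-- outside the precondition, e.g. on translate_to_intervals([[]]): A raises IndexError, B raises IndexError
import Mathlib
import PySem

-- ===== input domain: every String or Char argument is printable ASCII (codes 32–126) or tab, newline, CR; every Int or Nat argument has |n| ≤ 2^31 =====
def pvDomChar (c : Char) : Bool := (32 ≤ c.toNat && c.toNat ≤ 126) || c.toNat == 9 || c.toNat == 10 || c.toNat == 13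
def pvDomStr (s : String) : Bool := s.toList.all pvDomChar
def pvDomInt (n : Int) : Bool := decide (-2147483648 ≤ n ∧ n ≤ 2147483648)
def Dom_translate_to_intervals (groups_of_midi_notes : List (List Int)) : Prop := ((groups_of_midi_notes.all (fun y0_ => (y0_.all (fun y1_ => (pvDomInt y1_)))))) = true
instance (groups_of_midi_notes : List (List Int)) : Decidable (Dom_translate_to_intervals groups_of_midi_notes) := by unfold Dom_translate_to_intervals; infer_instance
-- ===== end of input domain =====

-- B replaces A's recursive repeated-filtering dedup (through a module-level global list) by a per-group
-- pitch-class→minimum-note dict built in one pass, then one sort and a comprehension of differences from the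
-- bass (objective: idiomatic). Both A and B sort each group in place; the equivalence is about the return value.

-- ===== PORT A =====
def remove_note (note : Int) (notes : List Int) : List Int :=
  notes.filter (fun x => PySem.Int.mod x 12 != PySem.Int.mod note 12)

-- the module-level global `remove_octaves_res` (cleared before each call) is modelled as the accumulator `res`
def remove_octaves (res : List Int) (notes : List Int) : List Int :=
  match notes with
  | [] => res
  | note :: rest => remove_octaves (res ++ [note]) (remove_note note (note :: rest))
  termination_by notes.length
  decreasing_by
    have he : remove_note note (note :: rest) = List.filter (fun x => PySem.Int.mod x 12 != PySem.Int.mod note 12) rest := by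
      rw [remove_note, List.filter_cons, if_neg (by simp)]
    rw [he]
    have h := List.length_filter_le (fun x => PySem.Int.mod x 12 != PySem.Int.mod note 12) rest
    simp only [List.length_cons]
    omega

def groupIntervals (l : List Int) : List Int :=
  let sortedl := PySem.List.sorted l (fun x => x) false
  let arranged := remove_octaves [] sortedl
  match PySem.List.pyGet? arranged (0 : Int) with
  | none => []   -- arranged_midi_notes[0] on an empty group: Python raises IndexError, excluded by Pre_
  | some bass => arranged.foldl (fun acc note => if note != bass then acc ++ [note - bass] else acc) []

def translate_to_intervals (groups_of_midi_notes : List (List Int)) : List (List Int) :=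
  groups_of_midi_notes.foldl (fun result l => result ++ [groupIntervals l]) []

-- ===== PORT B =====
def groupIntervals_alt (grp : List Int) : List Int :=
  let s := PySem.List.sorted grp (fun x => x) false
  let d := s.foldl (fun d n =>
    let pc := PySem.Int.mod n 12
    if d.contains pc then d else d.insert pc n) (PySem.Dict.empty : PySem.Dict Int Int)
  let values := PySem.List.sorted d.values (fun x => x) false
  match PySem.List.pyGet? values (0 : Int) with
  | none => []   -- values[0] on an empty group: Python raises IndexError, excluded by Pre_
  | some bass => (PySem.List.slice values (some 1) none).map (fun v => v - bass)

def translate_to_intervals_alt (groups_of_midi_notes : List (List Int)) : List (List Int) :=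
  groups_of_midi_notes.foldl (fun result grp => result ++ [groupIntervals_alt grp]) []

-- ===== PRECONDITION & SPEC =====
-- On an empty group both Pythons raise IndexError (A at arranged_midi_notes[0], B at values[0]); Pre_ excludes those.
def Pre_translate_to_intervals (groups_of_midi_notes : List (List Int)) : Prop :=
  ∀ g ∈ groups_of_midi_notes, g ≠ []
instance (groups_of_midi_notes : List (List Int)) : Decidable (Pre_translate_to_intervals groups_of_midi_notes) := by unfold Pre_translate_to_intervals; infer_instance

def pvWitness_translate_to_intervals : List (List Int) := [[64, 60, 67, 72], [50, 55, 62]]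

def Spec_translate_to_intervals (groups_of_midi_notes : List (List Int)) (out : List (List Int)) : Prop := out = translate_to_intervals_alt groups_of_midi_notes
instance (groups_of_midi_notes : List (List Int)) (out : List (List Int)) : Decidable (Spec_translate_to_intervals groups_of_midi_notes out) := by unfold Spec_translate_to_intervals; infer_instance

-- ===== CLAIM (what is proved, stated in full; the proofs are below) =====
def Claim_equal_translate_to_intervals : Prop := ∀ (groups_of_midi_notes : List (List Int)), Dom_translate_to_intervals groups_of_midi_notes → Pre_translate_to_intervals groups_of_midi_notes → Spec_translate_to_intervals groups_of_midi_notes (translate_to_intervals groups_of_midi_notes)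

-- ===== LEMMAS AND PROOFS =====

-- first occurrence of each pitch class, in order: the common characterisation of both per-group computations
def firstPC : List Int → List Int
  | [] => []
  | x :: xs => x :: firstPC (xs.filter (fun y => PySem.Int.mod y 12 != PySem.Int.mod x 12))
  termination_by l => l.length
  decreasing_by
    simp only [List.length_unattach, List.length_cons]
    exact Nat.lt_succ_of_le (le_trans (List.length_filter_le _ _) (le_of_eq (by simp)))

-- induction along firstPC's recursion (stated by hand: the auto-generated principle carries `attach` noise)
theorem firstPC_rec (P : List Int → Prop) (h1 : P [])
    (h2 : ∀ x xs, P (xs.filter (fun y => PySem.Int.mod y 12 != PySem.Int.mod x 12)) → P (x :: xs)) :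
    ∀ l, P l := by
  have H : ∀ n (l : List Int), l.length ≤ n → P l := by
    intro n
    induction n with
    | zero =>
      intro l hl
      cases l with
      | nil => exact h1
      | cons x xs => simp at hl
    | succ n ih =>
      intro l hl
      cases l with
      | nil => exact h1
      | cons x xs =>
        apply h2
        apply ih
        have h := List.length_filter_le (fun y => PySem.Int.mod y 12 != PySem.Int.mod x 12) xs
        simp only [List.length_cons] at hl
        omega
  exact fun l => H l.length l le_rfl

theorem remove_octaves_eq : ∀ (notes : List Int), ∀ res, remove_octaves res notes = res ++ firstPC notes := by
  refine firstPC_rec _ ?_ ?_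
  · intro res; rw [remove_octaves]; simp [firstPC]
  · intro x xs ih res
    have hr : remove_note x (x :: xs) = xs.filter (fun y => PySem.Int.mod y 12 != PySem.Int.mod x 12) := by
      rw [remove_note, List.filter_cons, if_neg (by simp)]
    rw [remove_octaves, hr, ih, firstPC]
    simp

theorem firstPC_sublist : ∀ l : List Int, List.Sublist (firstPC l) l := by
  refine firstPC_rec _ ?_ ?_
  · simp [firstPC]
  · intro x xs ih
    rw [firstPC]
    exact List.Sublist.cons₂ x (ih.trans List.filter_sublist)

theorem firstPC_pairwise_pc : ∀ l : List Int,
    (firstPC l).Pairwise (fun a b => PySem.Int.mod a 12 ≠ PySem.Int.mod b 12) := by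
  refine firstPC_rec _ ?_ ?_
  · simp [firstPC]
  · intro x xs ih
    rw [firstPC]
    refine List.Pairwise.cons ?_ ih
    intro y hy
    have hmem : y ∈ xs.filter (fun y => PySem.Int.mod y 12 != PySem.Int.mod x 12) :=
      (firstPC_sublist _).subset hy
    have := (List.mem_filter.mp hmem).2
    simp only [bne_iff_ne, ne_eq] at this
    exact fun h => this (h.symm)

theorem firstPC_pairwise_lt (l : List Int) (h : l.Pairwise (fun a b => (a : Int) ≤ b)) :
    (firstPC l).Pairwise (· < ·) := by
  have h1 : (firstPC l).Pairwise (fun a b => (a : Int) ≤ b) := h.sublist (firstPC_sublist l)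
  have h2 := firstPC_pairwise_pc l
  refine (h1.and h2).imp ?_
  rintro a b ⟨hle, hne⟩
  rcases lt_or_eq_of_le hle with h | h
  · exact h
  · exact absurd (by rw [h]) hne

theorem values_fold (s : List Int) : ∀ d : PySem.Dict Int Int,
    (s.foldl (fun d n =>
      let pc := PySem.Int.mod n 12
      if d.contains pc then d else d.insert pc n) d).values
      = d.values ++ firstPC (s.filter (fun x => !(d.contains (PySem.Int.mod x 12)))) := by
  induction s with
  | nil => intro d; simp [firstPC]
  | cons x xs ih =>
    intro d
    rw [List.foldl_cons]
    cases hc : d.contains (PySem.Int.mod x 12) with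
    | true =>
      have hstep : (let pc := PySem.Int.mod x 12;
          if d.contains pc then d else d.insert pc x) = d := by
        show (if d.contains (PySem.Int.mod x 12) then d else d.insert (PySem.Int.mod x 12) x) = d
        rw [hc]
        exact if_pos rfl
      rw [hstep, ih d, List.filter_cons, if_neg (by rw [hc]; simp)]
    | false =>
      have hstep : (let pc := PySem.Int.mod x 12;
          if d.contains pc then d else d.insert pc x) = d.insert (PySem.Int.mod x 12) x := by
        show (if d.contains (PySem.Int.mod x 12) then d else d.insert (PySem.Int.mod x 12) x) = _
        rw [hc]
        exact if_neg (by simp)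
      rw [hstep, ih (d.insert (PySem.Int.mod x 12) x)]
      have hv : (d.insert (PySem.Int.mod x 12) x).values = d.values ++ [x] := by
        simp only [PySem.Dict.values]
        rw [PySem.Dict.items_insert_of_not_contains d x hc]
        simp
      rw [hv, List.filter_cons, if_pos (by rw [hc]; rfl), firstPC, List.filter_filter]
      have hfeq : ∀ y ∈ xs,
          ((PySem.Int.mod y 12 != PySem.Int.mod x 12) && (!(d.contains (PySem.Int.mod y 12))))
            = (!((d.insert (PySem.Int.mod x 12) x).contains (PySem.Int.mod y 12))) := by
        intro y _
        rw [PySem.Dict.contains_insert]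
        simp only [bne, Bool.not_or]
      rw [List.filter_congr hfeq]
      simp

theorem group_eq (l : List Int) : groupIntervals l = groupIntervals_alt l := by
  unfold groupIntervals groupIntervals_alt
  have hs : (PySem.List.sorted l (fun x => x) false).Pairwise (fun a b => (a : Int) ≤ b) := by
    simpa using PySem.List.sorted_pairwise l (fun x => x)
  have harr : remove_octaves [] (PySem.List.sorted l (fun x => x) false)
      = firstPC (PySem.List.sorted l (fun x => x) false) := by
    rw [remove_octaves_eq]; simp
  have hd : ((PySem.List.sorted l (fun x => x) false).foldl (fun d n =>
      let pc := PySem.Int.mod n 12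
      if d.contains pc then d else d.insert pc n) (PySem.Dict.empty : PySem.Dict Int Int)).values
      = firstPC (PySem.List.sorted l (fun x => x) false) := by
    rw [values_fold]
    simp [PySem.Dict.values, PySem.Dict.empty]
  have hlt : (firstPC (PySem.List.sorted l (fun x => x) false)).Pairwise (· < ·) :=
    firstPC_pairwise_lt _ hs
  have hsv : PySem.List.sorted (firstPC (PySem.List.sorted l (fun x => x) false)) (fun x : Int => x) false
      = firstPC (PySem.List.sorted l (fun x => x) false) :=
    PySem.List.sorted_eq_of_perm_of_pairwise_lt _ _ _ (List.Perm.refl _) (by simpa using hlt)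
  simp only [harr, hd, hsv]
  cases hfp : firstPC (PySem.List.sorted l (fun x => x) false) with
  | nil => simp [pysem]
  | cons bass rest =>
    rw [hfp] at hlt
    have hget : PySem.List.pyGet? (bass :: rest) (0 : Int) = some bass := by simp [pysem]
    rw [hget]
    change (List.foldl (fun acc note => if note != bass then acc ++ [note - bass] else acc) [] (bass :: rest))
      = (PySem.List.slice (bass :: rest) (some 1) none).map (fun v => v - bass)
    rw [PySem.List.foldl_append_if (fun note => note != bass) (fun note => note - bass) (bass :: rest) [],
        PySem.List.slice_from_one]
    have hby := (List.pairwise_cons.mp hlt).1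
    have hfr : rest.filter (fun note => note != bass) = rest := by
      apply List.filter_eq_self.mpr
      intro y hy
      simp only [bne_iff_ne, ne_eq]
      exact ne_of_gt (hby y hy)
    rw [List.filter_cons, if_neg (by simp), hfr]
    simp

-- ===== VERDICT (by name: the statement is the Claim_ definition above) =====
theorem translate_to_intervals_spec : Claim_equal_translate_to_intervals := by
  intro groups hdom hpre
  unfold Spec_translate_to_intervals translate_to_intervals translate_to_intervals_alt
  rw [PySem.List.foldl_append_singleton_eq_map groupIntervals groups [],
      PySem.List.foldl_append_singleton_eq_map groupIntervals_alt groups []]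
  rw [funext group_eq]
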